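-- pv_equiv track=rewrite | github.com/Odrec/deeplecture | useful_functions.py | split_metadata_entity
-- ===== SOURCE A (Python) =====
-- def split_metadata_entity(metadata_list):
--     choices = {}
--     for data in metadata_list:
--         if isinstance(data, str):
--             if '|' in data:
--                 data_parts = data.split('|')
--                 if data_parts[0] not in choices:
--                     choices[data_parts[0]] = set()
--                 choices[data_parts[0]].update(data_parts[1:])
--             else:
--                 if data not in choices.keys():
--                     choices[data] = set()
--     return choices
-- ===== SOURCE B (Python) =====
-- def split_metadata_entity(metadata_list):
--     strs = [d for d in metadata_list if isinstance(d, str)]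
--     keys = list(dict.fromkeys(s.split('|')[0] for s in strs))
--     choices = {}
--     for k in keys:
--         vals = set()
--         for s in strs:
--             if '|' in s and s.split('|')[0] == k:
--                 vals.update(s.split('|')[1:])
--         choices[k] = vals
--     return choices
-- ===== Notes on version B (the rewrite author's own statement) =====
-- stated objective: alternative
-- what changed: Replaces A's single pass that incrementally mutates per-key sets in a dict with a two-phase grouping: first compute the distinct prefixes in first-occurrence order (dict.fromkeys dedup), then build each key's suffix set by one dedicated scan per key.
import Mathlib
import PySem

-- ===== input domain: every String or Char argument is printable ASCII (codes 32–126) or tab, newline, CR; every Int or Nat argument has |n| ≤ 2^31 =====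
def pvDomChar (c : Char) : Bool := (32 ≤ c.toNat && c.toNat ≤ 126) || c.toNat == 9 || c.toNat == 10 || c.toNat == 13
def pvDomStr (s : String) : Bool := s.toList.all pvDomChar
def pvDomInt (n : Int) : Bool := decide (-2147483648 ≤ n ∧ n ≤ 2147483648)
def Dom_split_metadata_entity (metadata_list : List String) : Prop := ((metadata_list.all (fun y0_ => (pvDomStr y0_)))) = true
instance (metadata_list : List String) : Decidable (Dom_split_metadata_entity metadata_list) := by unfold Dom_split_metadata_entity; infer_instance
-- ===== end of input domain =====

-- B replaces A's single mutating pass with a two-phase grouping (dedup keys, then one collecting scan per key); alternative decomposition, same results.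
-- (The 'isinstance(data, str)' checks are always true on List String and are dropped in both ports.)

-- ===== PORT A =====
-- one loop iteration of A: ensure the key (parts[0], or the whole string) exists, then update its set with parts[1:]
def pvStepA (choices : PySem.Dict String (PySem.Set String)) (data : String) : PySem.Dict String (PySem.Set String) :=
  if PySem.Str.isIn "|" data then
    -- data.split('|'): sep "|" ≠ "" so split? is always some; the result is never empty so headD "" is parts[0]
    let data_parts := (PySem.Str.split? data "|").getD []
    let choices' := if choices.contains (data_parts.headD "") then choices
                    else choices.insert (data_parts.headD "") PySem.Set.empty
    choices'.modify (data_parts.headD "") PySem.Set.empty (fun v => PySem.Set.update v data_parts.tail)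
  else
    if choices.contains data then choices else choices.insert data PySem.Set.empty

def split_metadata_entity (metadata_list : List String) : List (String × List String) :=
  (metadata_list.foldl pvStepA PySem.Dict.empty).items

-- ===== PORT B =====
-- s.split('|')[0]
def pvKeyOf (s : String) : String := ((PySem.Str.split? s "|").getD []).headD ""

-- inner loop body of B: add s's suffixes to vals when s belongs to group k
def pvStepV (k : String) (vals : PySem.Set String) (s : String) : PySem.Set String :=
  if PySem.Str.isIn "|" s && (pvKeyOf s == k) then
    PySem.Set.update vals ((PySem.Str.split? s "|").getD []).tail
  else vals

def split_metadata_entity_alt (metadata_list : List String) : List (String × List String) :=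
  (PySem.List.dedup (metadata_list.map pvKeyOf)).map
    (fun k => (k, metadata_list.foldl (pvStepV k) PySem.Set.empty))

-- ===== PRECONDITION & SPEC =====
def Spec_split_metadata_entity (metadata_list : List String) (out : List (String × List String)) : Prop := out = split_metadata_entity_alt metadata_list
instance (metadata_list : List String) (out : List (String × List String)) : Decidable (Spec_split_metadata_entity metadata_list out) := by unfold Spec_split_metadata_entity; infer_instance

-- ===== CLAIM (what is proved, stated in full; the proofs are below) =====
def Claim_equal_split_metadata_entity : Prop := ∀ (metadata_list : List String), Dom_split_metadata_entity metadata_list → Spec_split_metadata_entity metadata_list (split_metadata_entity metadata_list)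

-- ===== LEMMAS AND PROOFS =====

-- no '|' in l, enough fuel: splitOn.go consumes l into cur and closes the final piece
theorem pv_go_no_pipe (l : List Char) (h : '|' ∉ l) :
    ∀ (fuel : Nat), l.length ≤ fuel → ∀ (cur : List Char) (acc : List (List Char)),
      PySem.Chars.splitOn.go ['|'] fuel l cur acc = ((cur.reverse ++ l) :: acc).reverse := by
  induction l with
  | nil =>
    intro fuel _ cur acc
    cases fuel <;> simp [PySem.Chars.splitOn.go]
  | cons c rest ih =>
    intro fuel hf cur acc
    cases fuel with
    | zero => simp at hf
    | succ fuel =>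
      have hc : c ≠ '|' := fun hc => h (by simp [hc])
      have hrest : '|' ∉ rest := fun hm => h (by simp [hm])
      have hpre : List.isPrefixOf ['|'] (c :: rest) = false := by
        simp [List.isPrefixOf]; exact fun hcc => (hc hcc.symm).elim
      rw [PySem.Chars.splitOn.go]
      simp only [hpre]
      rw [ih hrest fuel (by simpa using hf) (c :: cur) acc]
      simp

theorem pv_split_no_pipe (s : String) (h : PySem.Str.isIn "|" s = false) :
    (PySem.Str.split? s "|").getD [] = [s] := by
  have hmem : '|' ∉ s.toList := by
    intro hm
    have h2 : PySem.Chars.isIn ['|'] s.toList = false := by simpa [PySem.Str.isIn] using h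
    rw [PySem.Chars.isIn_eq_false_iff] at h2
    exact h2 ((List.singleton_infix_iff '|' s.toList).mpr hm)
  have : PySem.Chars.splitOn s.toList ['|'] = [s.toList] := by
    rw [PySem.Chars.splitOn]
    rw [pv_go_no_pipe s.toList hmem (s.toList.length + 1) (by omega) [] []]
    simp
  simp [PySem.Str.split?, PySem.Chars.split?, this]

theorem pv_key_no_pipe (s : String) (h : PySem.Str.isIn "|" s = false) : pvKeyOf s = s := by
  simp [pvKeyOf, pv_split_no_pipe s h]

-- dedup over an appended element
theorem pv_dedup_append (l : List String) (x : String) :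
    PySem.List.dedup (l ++ [x]) =
      if x ∈ PySem.List.dedup l then PySem.List.dedup l else PySem.List.dedup l ++ [x] := by
  simp only [PySem.List.dedup_eq_ofList, PySem.Set.ofList_eq_foldl, List.foldl_append, List.foldl]
  rw [show PySem.Set.add (List.foldl PySem.Set.add [] l) x
        = if (List.foldl PySem.Set.add [] l).contains x then List.foldl PySem.Set.add [] l
          else List.foldl PySem.Set.add [] l ++ [x] from rfl]
  congr 1
  simp [PySem.Set.contains]

-- a key that no element of xs maps to collects nothing
theorem pv_V_empty (k : String) (xs : List String) (h : k ∉ xs.map pvKeyOf) :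
    ∀ v, xs.foldl (pvStepV k) v = v := by
  induction xs with
  | nil => intro v; rfl
  | cons s rest ih =>
    intro v
    have hk : pvKeyOf s ≠ k := fun he => h (by simp [he.symm])
    have : pvStepV k v s = v := by
      simp [pvStepV, hk]
    rw [List.foldl_cons, this]
    exact ih (fun hm => h (by simp at hm ⊢; exact Or.inr hm)) v

-- main invariant, by reverse induction on the list
theorem pv_main (xs : List String) :
    (xs.foldl pvStepA PySem.Dict.empty).items =
      (PySem.List.dedup (xs.map pvKeyOf)).map
        (fun k => (k, xs.foldl (pvStepV k) PySem.Set.empty)) := by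
  induction xs using List.reverseRecOn with
  | nil => rfl
  | append_singleton xs s ih =>
    have hfold : (xs ++ [s]).foldl pvStepA PySem.Dict.empty
        = pvStepA (xs.foldl pvStepA PySem.Dict.empty) s := by simp
    set d := xs.foldl pvStepA PySem.Dict.empty with hd
    set keysxs := PySem.List.dedup (xs.map pvKeyOf) with hkx
    have hkeys : d.keys = keysxs := by
      rw [PySem.Dict.keys, ih, List.map_map]
      exact (List.map_congr_left fun a _ => rfl).trans (List.map_id _)
    have hnd : d.keys.Nodup := by rw [hkeys]; exact PySem.List.nodup_dedup _
    have hVapp : ∀ kk : String, (xs ++ [s]).foldl (pvStepV kk) PySem.Set.empty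
        = pvStepV kk (xs.foldl (pvStepV kk) PySem.Set.empty) s := by intro kk; simp
    have hKapp : PySem.List.dedup ((xs ++ [s]).map pvKeyOf)
        = if pvKeyOf s ∈ keysxs then keysxs else keysxs ++ [pvKeyOf s] := by
      rw [List.map_append, List.map_singleton]
      exact pv_dedup_append _ _
    have hkeyfold : ((PySem.Str.split? s "|").getD []).headD "" = pvKeyOf s := rfl
    rw [hfold, hKapp]
    by_cases hp : PySem.Str.isIn "|" s = true
    · -- '|' in s
      have hpc : PySem.Chars.isIn ['|'] s.toList = true := by
        simpa [PySem.Str.isIn] using hp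
      by_cases hin : pvKeyOf s ∈ keysxs
      · have hct : d.contains (pvKeyOf s) = true :=
          (PySem.Dict.contains_iff_mem_keys d _).mpr (hkeys ▸ hin)
        have hmemit : (pvKeyOf s, xs.foldl (pvStepV (pvKeyOf s)) PySem.Set.empty) ∈ d.items := by
          rw [ih]; exact List.mem_map_of_mem hin
        have hgetD := PySem.Dict.getD_of_mem_items d hmemit hnd PySem.Set.empty
        simp only [pvStepA, hp, if_true, hkeyfold, hct, PySem.Dict.modify, hgetD,
          if_pos hin]
        rw [PySem.Dict.items_insert_of_contains d _ hct, ih, List.map_map]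
        apply List.map_congr_left
        intro kk hkk
        by_cases hkeq : kk = pvKeyOf s
        · subst hkeq
          rw [hVapp]
          simp [pvStepV, PySem.Str.isIn, hpc]
        · rw [hVapp]
          simp [pvStepV, PySem.Str.isIn, hpc, hkeq, Ne.symm hkeq]
      · have hcf : d.contains (pvKeyOf s) = false := by
          rw [← Bool.not_eq_true, PySem.Dict.contains_iff_mem_keys d, hkeys]
          exact hin
        have hVe : xs.foldl (pvStepV (pvKeyOf s)) PySem.Set.empty = PySem.Set.empty :=
          pv_V_empty _ _ (fun hm => hin (by rw [hkx, PySem.List.mem_dedup]; exact hm)) _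
        simp only [pvStepA, hp, if_true, hkeyfold, hcf, Bool.false_eq_true, if_false,
          PySem.Dict.modify, PySem.Dict.getD_insert_self, if_neg hin]
        rw [PySem.Dict.items_insert_of_contains _ _ (PySem.Dict.contains_insert_self d _ _),
          PySem.Dict.items_insert_of_not_contains d _ hcf, List.map_append, ih, List.map_map,
          List.map_append]
        congr 1
        · apply List.map_congr_left
          intro kk hkk
          have hne : pvKeyOf s ≠ kk := fun he => hin (he ▸ hkk)
          simp only [Function.comp_apply]
          rw [hVapp]
          simp [pvStepV, hne, Ne.symm hne]
        · rw [List.map_singleton, List.map_singleton, hVapp, hVe]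
          simp [pvStepV, PySem.Str.isIn, hpc]
    · -- no '|' in s: the key is s itself and nothing is collected
      have hpf : PySem.Str.isIn "|" s = false := by simpa using hp
      have hpcf : PySem.Chars.isIn ['|'] s.toList = false := by
        simpa [PySem.Str.isIn] using hpf
      have hks : pvKeyOf s = s := pv_key_no_pipe s hpf
      have hstep0 : ∀ (kk : String) (v : PySem.Set String), pvStepV kk v s = v := by
        intro kk v; simp [pvStepV, PySem.Str.isIn, hpcf]
      have hVsame : ∀ kk : String, (xs ++ [s]).foldl (pvStepV kk) PySem.Set.empty
          = xs.foldl (pvStepV kk) PySem.Set.empty := by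
        intro kk; rw [hVapp, hstep0]
      by_cases hin : pvKeyOf s ∈ keysxs
      · have hct : d.contains s = true :=
          (PySem.Dict.contains_iff_mem_keys d _).mpr (hkeys ▸ (hks ▸ hin))
        simp only [pvStepA, hpf, Bool.false_eq_true, if_false, hct, if_true, if_pos hin]
        rw [ih]
        apply List.map_congr_left
        intro kk hkk
        rw [hVsame]
      · have hcf : d.contains s = false := by
          rw [← Bool.not_eq_true, PySem.Dict.contains_iff_mem_keys d, hkeys]
          exact hks ▸ hin
        have hVe : xs.foldl (pvStepV s) PySem.Set.empty = PySem.Set.empty :=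
          pv_V_empty _ _ (fun hm => hin (by rw [hkx, PySem.List.mem_dedup, hks]; exact hm)) _
        simp only [pvStepA, hpf, Bool.false_eq_true, if_false, hcf, if_neg hin]
        rw [PySem.Dict.items_insert_of_not_contains d _ hcf, ih, List.map_append, hks]
        congr 1
        · apply List.map_congr_left
          intro kk hkk
          rw [hVsame]
        · rw [List.map_singleton, hVsame, hVe]

-- ===== VERDICT (by name: the statement is the Claim_ definition above) =====
theorem split_metadata_entity_spec : Claim_equal_split_metadata_entity := by
  intro metadata_list _
  unfold Spec_split_metadata_entity split_metadata_entity split_metadata_entity_alt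
  exact pv_main metadata_list
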